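-- pv_equiv track=rewrite | github.com/parsashahzeidi/Alton | ETC/_Generation/VersionDataHeaderGenerator.py | basic_format
-- ===== SOURCE A (Python) =====
-- def basic_format(string: str, property_name: str, short_property_name: str):
-- 	# --- Head
-- 	lines = string.split('\n')
-- 	cache = []
--
-- 	macro_names = []
-- 	define_checks = []
-- 	informal_names = []
--
-- 	defines = ""
-- 	check_commands = ""
--
-- 	index = 0
--
-- 	# --- Body
-- 	# -- Formatting
-- 	for i in lines:
-- 		cache = i.split(' ')
-- 		if len(cache) <= 1:
-- 			continue
--
-- 		informal_names.append(cache[0])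
-- 		macro_names.append(cache[1])
-- 		define_checks.append(cache[2:])
--
-- 	# -- Generating preprocessor scripts
-- 	for i in range(len(macro_names)):
-- 		defines += "# define " + macro_names[i] + " " + str(index) + "\n"
-- 		index += 1
--
-- 		check_commands += "if defined(" + define_checks[i][0] + ")"
--
-- 		if len(define_checks[i]) > 1:
-- 			check_commands += " || defined("
--
-- 			for j in define_checks[i][1:-1]:
-- 				check_commands += j + ") || defined("
--
-- 			check_commands += define_checks[i][-1] + ")"
-- 		check_commands += "\n\t# define " +	property_name + " " + macro_names[i] + 	"\n"
-- 		check_commands += "\t# define " +	property_name + '_TEXT U"' + informal_names[i] + '"\n\n'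
-- 		check_commands += "# el"
--
-- 	return defines[:-1], check_commands
-- ===== SOURCE B (Python) =====
-- def basic_format(string: str, property_name: str, short_property_name: str):
-- 	# Single pass: build the define fragments as a list (its length is the index)
-- 	# and the check string directly from each line's tokens; join at the end.
-- 	define_parts = []
-- 	check_commands = ""
--
-- 	for line in string.split('\n'):
-- 		toks = line.split(' ')
-- 		if len(toks) <= 1:
-- 			continue
--
-- 		define_parts.append("# define " + toks[1] + " " + str(len(define_parts)))
--
-- 		clause = "defined(" + toks[2] + ")" + "".join(
-- 			" || defined(" + t + ")" for t in toks[3:])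
-- 		check_commands += (
-- 			"if " + clause
-- 			+ "\n\t# define " + property_name + " " + toks[1] + "\n"
-- 			+ "\t# define " + property_name + '_TEXT U"' + toks[0] + '"\n\n'
-- 			+ "# el"
-- 		)
--
-- 	return "\n".join(define_parts), check_commands
-- ===== Notes on version B (the rewrite author's own statement) =====
-- stated objective: simpler
-- what changed: B replaces A's two passes (three parallel lists then an index loop with a hand-rolled first/middle/last clause builder) by one pass per line that builds the define fragments as a list (whose length is the index) and each check clause as the first defined(...) term plus a join over the remaining tokens.
import Mathlib
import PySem

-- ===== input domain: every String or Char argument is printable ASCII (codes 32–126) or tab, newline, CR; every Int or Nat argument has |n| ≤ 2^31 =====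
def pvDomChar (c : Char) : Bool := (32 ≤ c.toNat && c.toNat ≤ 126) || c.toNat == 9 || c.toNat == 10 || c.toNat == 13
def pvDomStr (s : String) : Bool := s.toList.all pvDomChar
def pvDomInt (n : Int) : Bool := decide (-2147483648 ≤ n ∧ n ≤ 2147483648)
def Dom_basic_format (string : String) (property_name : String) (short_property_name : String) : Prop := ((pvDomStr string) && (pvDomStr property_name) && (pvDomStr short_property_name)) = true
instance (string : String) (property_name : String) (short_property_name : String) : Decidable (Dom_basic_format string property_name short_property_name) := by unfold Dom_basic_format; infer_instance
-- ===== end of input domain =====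

-- B collapses A's two passes (three parallel lists + an index loop) into one pass per line,
-- building the define fragments as a list joined at the end; objective: simpler.

-- ===== PORT A =====
-- shared helper: Python's s.split(sep) for a non-empty sep
def pySplit (s sep : String) : List String := (PySem.Str.split? s sep).getD []

-- body of A's first loop (collecting the three parallel lists)
def bfStep1 (st : List String × List String × List (List String)) (i : String) :
    List String × List String × List (List String) :=
  let cache := pySplit i " "
  if cache.length ≤ 1 then st
  else (st.1 ++ [(cache[0]?.getD "")], st.2.1 ++ [(cache[1]?.getD "")],
        st.2.2 ++ [PySem.List.slice cache (some 2) none])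

-- body of A's second loop (over range(len(macro_names)))
def bfStep2 (property_name : String)
    (informal_names macro_names : List String) (define_checks : List (List String))
    (st : String × String × Int) (i : Nat) : String × String × Int :=
  let defines := st.1 ++ "# define " ++ (macro_names[i]?.getD "") ++ " " ++ PySem.Int.toStr st.2.2 ++ "\n"
  let index := st.2.2 + 1
  let dci := define_checks[i]?.getD []
  let cc := st.2.1 ++ "if defined(" ++ (dci[0]?.getD "") ++ ")"
  let cc := if 1 < dci.length then
      let cc := cc ++ " || defined("
      let cc := (PySem.List.slice dci (some 1) (some (-1))).foldl
        (fun cc j => cc ++ j ++ ") || defined(") cc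
      cc ++ ((PySem.List.pyGet? dci (-1)).getD "") ++ ")"
    else cc
  let cc := cc ++ "\n\t# define " ++ property_name ++ " " ++ (macro_names[i]?.getD "") ++ "\n"
  let cc := cc ++ "\t# define " ++ property_name ++ "_TEXT U\"" ++ (informal_names[i]?.getD "") ++ "\"\n\n"
  let cc := cc ++ "# el"
  (defines, cc, index)

def basic_format (string : String) (property_name : String) (short_property_name : String) : String × String :=
  let lines := pySplit string "\n"
  let acc := lines.foldl bfStep1 ([], [], [])
  let res := (List.range acc.2.1.length).foldl (bfStep2 property_name acc.1 acc.2.1 acc.2.2)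
    ("", "", (0 : Int))
  (PySem.Str.slice res.1 none (some (-1)), res.2.1)

-- ===== PORT B =====
-- body of B's single loop (toks[2] is a hard access in Source B; inside Pre_ every kept line
-- has ≥ 3 tokens, so the getD default is never reached there)
def bfAltStep (property_name : String) (st : List String × String) (line : String) :
    List String × String :=
  let toks := pySplit line " "
  if toks.length ≤ 1 then st
  else
    let define_parts := st.1 ++ ["# define " ++ (toks[1]?.getD "") ++ " " ++ PySem.Int.toStr (st.1.length : Int)]
    let clause := "defined(" ++ (toks[2]?.getD "") ++ ")"
      ++ (toks.drop 3).foldl (fun a t => a ++ (" || defined(" ++ t ++ ")")) ""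
    let check_commands := st.2 ++ "if " ++ clause
      ++ "\n\t# define " ++ property_name ++ " " ++ (toks[1]?.getD "") ++ "\n"
      ++ "\t# define " ++ property_name ++ "_TEXT U\"" ++ (toks[0]?.getD "") ++ "\"\n\n"
      ++ "# el"
    (define_parts, check_commands)

def basic_format_alt (string : String) (property_name : String) (short_property_name : String) : String × String :=
  let res := (pySplit string "\n").foldl (bfAltStep property_name) ([], "")
  (PySem.Str.join "\n" res.1, res.2)

-- ===== PRECONDITION & SPEC =====
-- Pre_ excludes inputs with a line of exactly two space-separated tokens: there both A and B
-- raise IndexError (A on define_checks[i][0], B on toks[2]).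
def Pre_basic_format (string : String) (property_name : String) (short_property_name : String) : Prop :=
  ∀ i ∈ (PySem.Str.split? string "\n").getD [], ((PySem.Str.split? i " ").getD []).length ≠ 2
instance (string : String) (property_name : String) (short_property_name : String) : Decidable (Pre_basic_format string property_name short_property_name) := by unfold Pre_basic_format; infer_instance

def pvWitness_basic_format : String × String × String := ("alpha A x y\nskip\nbeta B m", "PROP", "S")

def Spec_basic_format (string : String) (property_name : String) (short_property_name : String) (out : String × String) : Prop := out = basic_format_alt string property_name short_property_name
instance (string : String) (property_name : String) (short_property_name : String) (out : String × String) : Decidable (Spec_basic_format string property_name short_property_name out) := by unfold Spec_basic_format; infer_instance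

-- ===== CLAIM (what is proved, stated in full; the proofs are below) =====
def Claim_equal_basic_format : Prop := ∀ (string : String) (property_name : String) (short_property_name : String), Dom_basic_format string property_name short_property_name → Pre_basic_format string property_name short_property_name → Spec_basic_format string property_name short_property_name (basic_format string property_name short_property_name)

-- ===== LEMMAS AND PROOFS =====

-- the lines A keeps, as token lists (length ≥ 2)
def entryOf (i : String) : Option (List String) :=
  let c := pySplit i " "
  if c.length ≤ 1 then none else some c

-- per-entry step of A's second loop, with the three list lookups resolved
def fA (pn : String) (st : String × String × Int) (e : List String) : String × String × Int :=
  bfStep2 pn [(e[0]?.getD "")] [(e[1]?.getD "")] [PySem.List.slice e (some 2) none] st 0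

-- B's tail-clause accumulator
def bfJ (l : List String) : String := l.foldl (fun a w => a ++ (" || defined(" ++ w ++ ")")) ""

-- per-entry step of B's loop (the non-skip branch of bfAltStep)
def hB (pn : String) (st : List String × String) (e : List String) : List String × String :=
  (st.1 ++ ["# define " ++ (e[1]?.getD "") ++ " " ++ PySem.Int.toStr (st.1.length : Int)],
   st.2 ++ "if " ++ ("defined(" ++ (e[2]?.getD "") ++ ")" ++ bfJ (e.drop 3))
     ++ "\n\t# define " ++ pn ++ " " ++ (e[1]?.getD "") ++ "\n"
     ++ "\t# define " ++ pn ++ "_TEXT U\"" ++ (e[0]?.getD "") ++ "\"\n\n"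
     ++ "# el")

-- A's flat defines accumulator as a function of B's parts list
def flatD (ps : List String) : String := ps.foldl (fun a p => a ++ p ++ "\n") ""

theorem bf_phase1 (lines : List String) :
    ∀ (a b : List String) (c : List (List String)),
    lines.foldl bfStep1 (a, b, c) =
      (a ++ (lines.filterMap entryOf).map (fun e => e[0]?.getD ""),
       b ++ (lines.filterMap entryOf).map (fun e => e[1]?.getD ""),
       c ++ (lines.filterMap entryOf).map (fun e => PySem.List.slice e (some 2) none)) := by
  induction lines with
  | nil => simp
  | cons i rest ih =>
    intro a b c
    by_cases h : (pySplit i " ").length ≤ 1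
    · simp only [List.foldl_cons, List.filterMap_cons, bfStep1, entryOf, if_pos h]
      exact ih a b c
    · simp only [List.foldl_cons, List.filterMap_cons, bfStep1, entryOf, if_neg h]
      rw [ih]
      simp [entryOf]

theorem foldl_range_getD {α σ : Type} (es : List α) (g : σ → Nat → σ) (f : σ → α → σ)
    (h : ∀ s i (hi : i < es.length), g s i = f s es[i]) :
    ∀ init : σ, (List.range es.length).foldl g init = es.foldl f init := by
  induction es using List.reverseRecOn with
  | nil => simp
  | append_singleton es x ih =>
    intro init
    have hlen : (es ++ [x]).length = es.length + 1 := by simp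
    rw [hlen, List.range_succ, List.foldl_append, List.foldl_append]
    rw [ih (fun s i hi => by
      rw [h s i (by simp; omega)]
      congr 1
      rw [List.getElem_append_left hi])]
    simp only [List.foldl_cons, List.foldl_nil]
    rw [h _ es.length (by simp)]
    congr 1
    simp

theorem bfA_eq (string pn spn : String) :
    basic_format string pn spn =
      (PySem.Str.slice (((pySplit string "\n").filterMap entryOf).foldl (fA pn) ("", "", 0)).1 none (some (-1)),
       (((pySplit string "\n").filterMap entryOf).foldl (fA pn) ("", "", 0)).2.1) := by
  simp only [basic_format]
  rw [bf_phase1]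
  simp only [List.nil_append]
  rw [show ((((pySplit string "\n").filterMap entryOf).map (fun e => e[1]?.getD "")).length) = ((pySplit string "\n").filterMap entryOf).length by simp]
  rw [foldl_range_getD ((pySplit string "\n").filterMap entryOf) _ (fA pn)
    (fun s i hi => by simp [bfStep2, fA, List.getElem?_eq_getElem hi])]

theorem bfAlt_filter (pn : String) (lines : List String) :
    ∀ init, lines.foldl (bfAltStep pn) init = (lines.filterMap entryOf).foldl (hB pn) init := by
  induction lines with
  | nil => simp
  | cons i rest ih =>
    intro init
    by_cases h : (pySplit i " ").length ≤ 1
    · simp only [List.foldl_cons, List.filterMap_cons, entryOf, bfAltStep, if_pos h]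
      exact ih _
    · simp only [List.foldl_cons, List.filterMap_cons, entryOf, bfAltStep, if_neg h]
      rw [ih]
      rfl

theorem bfB_eq (string pn spn : String) :
    basic_format_alt string pn spn =
      (PySem.Str.join "\n" (((pySplit string "\n").filterMap entryOf).foldl (hB pn) ([], "")).1,
       (((pySplit string "\n").filterMap entryOf).foldl (hB pn) ([], "")).2) := by
  simp only [basic_format_alt]
  rw [bfAlt_filter]

def bfM (l : List String) : String := l.foldl (fun a j => a ++ j ++ ") || defined(") ""

theorem foldl_shift (g : String → String) :
    ∀ (l : List String) (a0 : String),
    l.foldl (fun a x => a ++ g x) a0 = a0 ++ l.foldl (fun a x => a ++ g x) "" := by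
  intro l
  induction l with
  | nil => intro a0; simp
  | cons x xs ih =>
    intro a0
    simp only [List.foldl_cons]
    rw [ih (a0 ++ g x), ih ("" ++ g x)]
    simp [String.append_assoc]

theorem step_lam_eq : (fun (a j : String) => a ++ j ++ ") || defined(") =
    (fun (a j : String) => a ++ (j ++ ") || defined(")) := by
  funext a j; rw [String.append_assoc]

theorem bfM_shift (l : List String) (a0 : String) :
    l.foldl (fun a j => a ++ j ++ ") || defined(") a0 = a0 ++ bfM l := by
  unfold bfM; rw [step_lam_eq]; exact foldl_shift _ l a0

theorem bfJ_shift (l : List String) (a0 : String) :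
    l.foldl (fun a w => a ++ (" || defined(" ++ w ++ ")")) a0 = a0 ++ bfJ l := by
  unfold bfJ; exact foldl_shift _ l a0

theorem bfJ_append (zs : List String) (z : String) :
    bfJ (zs ++ [z]) = bfJ zs ++ (" || defined(" ++ z ++ ")") := by
  unfold bfJ
  rw [List.foldl_append]
  simp only [List.foldl_cons, List.foldl_nil]

theorem lit1 : ("if defined(" : String) = "if " ++ "defined(" := by decide
theorem lit3 : (") || defined(" : String) = ")" ++ " || defined(" := by decide

theorem bfM2 : ∀ ws : List String, " || defined(" ++ bfM ws = bfJ ws ++ " || defined(" := by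
  intro ws
  induction ws using List.reverseRecOn with
  | nil => simp [bfM, bfJ]
  | append_singleton ws x ih =>
    unfold bfM bfJ
    rw [List.foldl_append, List.foldl_append]
    simp only [List.foldl_cons, List.foldl_nil]
    rw [bfM_shift, bfJ_shift]
    rw [show (("" : String) ++ bfM ws) = bfM ws by simp,
        show (("" : String) ++ bfJ ws) = bfJ ws by simp]
    rw [← String.append_assoc, ← String.append_assoc, ih]
    rw [lit3]
    simp [String.append_assoc]

theorem slice_mid (x : String) (ys : List String) :
    PySem.List.slice (x::ys) (some 1) (some (-1)) = ys.dropLast := by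
  simp [PySem.List.slice, PySem.List.clampIdx, List.dropLast_eq_take]
  rw [if_neg (by omega)]
  omega

theorem pyGet_last (x : String) (ys : List String) :
    (PySem.List.pyGet? (x::ys) (-1)).getD "" = (x::ys).getLast (by simp) := by
  simp [PySem.List.pyGet?, PySem.List.pyIdx?]
  rw [List.getLast_eq_getElem]
  congr 1

theorem clause_eq (x : String) (ys : List String) (cc : String) :
    (if 1 < (x::ys).length then
       (PySem.List.slice (x::ys) (some 1) (some (-1))).foldl
           (fun cc j => cc ++ j ++ ") || defined(")
           (cc ++ "if defined(" ++ x ++ ")" ++ " || defined(")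
         ++ ((PySem.List.pyGet? (x::ys) (-1)).getD "") ++ ")"
     else cc ++ "if defined(" ++ x ++ ")") =
    cc ++ "if " ++ ("defined(" ++ x ++ ")" ++ bfJ ys) := by
  cases ys with
  | nil =>
    simp only [List.length_cons, List.length_nil]
    rw [if_neg (by omega)]
    rw [show bfJ [] = "" from rfl, String.append_empty, lit1]
    simp only [String.append_assoc]
  | cons y rest =>
    simp only [List.length_cons]
    rw [if_pos (by omega)]
    rw [slice_mid, bfM_shift, pyGet_last]
    rw [show ((cc ++ "if defined(" ++ x ++ ")" ++ " || defined(") ++ bfM (y :: rest).dropLast) =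
        (cc ++ "if defined(" ++ x ++ ")") ++ (" || defined(" ++ bfM (y :: rest).dropLast) from by
      simp only [String.append_assoc]]
    rw [bfM2]
    rw [show (x :: y :: rest).getLast (by simp) = (y :: rest).getLast (by simp) from
      List.getLast_cons (by simp)]
    rw [show ((cc ++ "if defined(" ++ x ++ ")") ++ (bfJ (y :: rest).dropLast ++ " || defined(")
          ++ ((y :: rest).getLast (by simp)) ++ ")") =
        (cc ++ "if defined(" ++ x ++ ")") ++ (bfJ (y :: rest).dropLast
          ++ (" || defined(" ++ ((y :: rest).getLast (by simp)) ++ ")")) from by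
      simp only [String.append_assoc]]
    rw [← bfJ_append, List.dropLast_append_getLast (by simp : (y :: rest) ≠ [])]
    rw [lit1]
    simp only [String.append_assoc]

theorem flatD_append (ps : List String) (q : String) :
    flatD (ps ++ [q]) = flatD ps ++ q ++ "\n" := by
  unfold flatD
  rw [List.foldl_append]
  simp

theorem step_eq (pn : String) (e : List String) (he : 3 ≤ e.length)
    (parts : List String) (cc : String) :
    fA pn (flatD parts, cc, (parts.length : Int)) e =
      (flatD (hB pn (parts, cc) e).1, (hB pn (parts, cc) e).2,
       ((hB pn (parts, cc) e).1.length : Int)) := by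
  have hcons : e.drop 2 = e[2] :: e.drop 3 :=
    List.drop_eq_getElem_cons (by omega)
  simp only [fA, bfStep2, hB, List.getElem?_cons_zero, Option.getD_some]
  rw [PySem.List.slice_from e (by norm_num)]
  rw [show ((2 : Int).toNat) = 2 from rfl, hcons]
  simp only [Prod.mk.injEq, List.getElem?_cons_zero, Option.getD_some]
  refine ⟨?_, ?_, ?_⟩
  · rw [flatD_append]
    simp only [String.append_assoc]
  · rw [show (e[2]?.getD "") = e[2] from by rw [List.getElem?_eq_getElem (by omega : 2 < e.length)]; rfl]
    exact congrArg (fun t => t ++ "\n\t# define " ++ pn ++ " " ++ e[1]?.getD "" ++ "\n" ++ "\t# define " ++ pn ++ "_TEXT U\"" ++ e[0]?.getD "" ++ "\"\n\n" ++ "# el") (clause_eq e[2] (e.drop 3) cc)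
  · simp only [List.length_append, List.length_cons, List.length_nil]
    push_cast
    ring

theorem main_inv (pn : String) :
    ∀ (es : List (List String)), (∀ e ∈ es, 3 ≤ e.length) →
    ∀ (parts : List String) (cc : String),
    es.foldl (fA pn) (flatD parts, cc, (parts.length : Int)) =
      (flatD (es.foldl (hB pn) (parts, cc)).1, (es.foldl (hB pn) (parts, cc)).2,
       ((es.foldl (hB pn) (parts, cc)).1.length : Int)) := by
  intro es
  induction es with
  | nil => intro _ parts cc; simp
  | cons e rest ih =>
    intro h3 parts cc
    have he := h3 e (by simp)
    have hrest : ∀ c ∈ rest, 3 ≤ c.length := fun c hc => h3 c (by simp [hc])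
    simp only [List.foldl_cons]
    rw [step_eq pn e he parts cc]
    exact ih hrest _ _

theorem litNL : ("\n" : String).toList = ['\n'] := by decide

theorem flatD_toList (ps : List String) :
    (flatD ps).toList = (ps.map (fun p => p.toList ++ ['\n'])).flatten := by
  induction ps using List.reverseRecOn with
  | nil => simp [flatD]
  | append_singleton ps q ih =>
    rw [flatD_append]
    simp [ih]

theorem dropLast_flatten : ∀ (ls : List (List Char)),
    ((ls.map (fun l => l ++ ['\n'])).flatten).dropLast = PySem.Chars.join ['\n'] ls := by
  intro ls
  induction ls with
  | nil => simp [PySem.Chars.join, List.intercalate]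
  | cons l ls ih =>
    cases ls with
    | nil => simp [PySem.Chars.join_singleton]
    | cons m ms =>
      have hne : ((m :: ms).map (fun l => l ++ ['\n'])).flatten ≠ [] := by simp
      rw [List.map_cons, List.flatten_cons, List.dropLast_append_of_ne_nil hne, ih,
        PySem.Chars.join_cons_cons]

theorem flat_join (ps : List String) :
    PySem.Str.slice (flatD ps) none (some (-1)) = PySem.Str.join "\n" ps := by
  apply String.toList_inj.mp
  rw [PySem.Str.slice_to_neg_one, PySem.Str.toList_join, flatD_toList, litNL]
  rw [show (ps.map (fun p => p.toList ++ ['\n'])) = ((ps.map String.toList).map (fun l => l ++ ['\n'])) from by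
    rw [List.map_map]; simp [Function.comp]]
  exact dropLast_flatten (ps.map String.toList)

-- ===== VERDICT (by name: the statement is the Claim_ definition above) =====
theorem basic_format_spec : Claim_equal_basic_format := by
  intro s pn spn hdom hpre
  unfold Spec_basic_format
  rw [bfA_eq s pn spn, bfB_eq s pn spn]
  have h3 : ∀ e ∈ (pySplit s "\n").filterMap entryOf, 3 ≤ e.length := by
    intro e he
    rw [List.mem_filterMap] at he
    obtain ⟨i, hi, hei⟩ := he
    unfold entryOf at hei
    by_cases h : (pySplit i " ").length ≤ 1
    · simp [h] at hei
    · simp only [if_neg h] at hei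
      have h2 := hpre i hi
      obtain rfl : pySplit i " " = e := Option.some.inj hei
      unfold pySplit at h h2 ⊢
      omega
  have hmain := main_inv pn ((pySplit s "\n").filterMap entryOf) h3 [] ""
  rw [show (flatD ([] : List String), ("" : String), ((([] : List String).length : Nat) : Int)) =
      (("" : String), ("" : String), (0 : Int)) from rfl] at hmain
  rw [hmain, flat_join]
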